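-- pv_equiv track=rewrite | github.com/Laljith123/ytub | generating/thumbnail.py | _wrap_title
-- ===== SOURCE A (Python) =====
-- def _wrap_title(text: str, max_chars: int, max_lines: int) -> str:
--     raw_lines = [line.strip() for line in str(text or "").splitlines() if line.strip()]
--     if not raw_lines:
--         raw_lines = [str(text or "").strip()]
--
--     lines: list[str] = []
--     for raw_line in raw_lines:
--         words = raw_line.split()
--         if not words:
--             continue
--         current = ""
--         for word in words:
--             candidate = f"{current} {word}".strip()
--             if len(candidate) <= max_chars or not current:
--                 current = candidate
--             else:
--                 lines.append(current)
--                 current = word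
--                 if len(lines) >= max_lines:
--                     return "\n".join(lines)
--         if current:
--             lines.append(current)
--             if len(lines) >= max_lines:
--                 return "\n".join(lines)
--     return "\n".join(lines[:max_lines])
-- ===== SOURCE B (Python) =====
-- def _wrap_greedy(words, max_chars):
--     # Split words into greedy lines by pure width arithmetic: each pass peels one
--     # line, which starts with its first word unconditionally and then absorbs
--     # following words while width + 1 + len(word) stays within max_chars.
--     # No candidate strings are built while deciding; each line is joined once.
--     out = []
--     rest = words
--     while rest:
--         line = [rest[0]]
--         width = len(rest[0])
--         rest = rest[1:]
--         while rest and width + 1 + len(rest[0]) <= max_chars: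
--             width += 1 + len(rest[0])
--             line.append(rest[0])
--             rest = rest[1:]
--         out.append(" ".join(line))
--     return out
--
--
-- def _wrap_title(text: str, max_chars: int, max_lines: int) -> str:
--     raw_lines = [line.strip() for line in str(text or "").splitlines() if line.strip()]
--     if not raw_lines:
--         raw_lines = [str(text or "").strip()]
--     full = []
--     for raw in raw_lines:
--         full.extend(_wrap_greedy(raw.split(), max_chars))
--     return "\n".join(full[:max(max_lines, 1)])
-- ===== Notes on version B (the rewrite author's own statement) =====
-- stated objective: alternative
-- what changed: B decides line breaks by pure integer width arithmetic over the word list (a recursive splitter that peels one greedy line of words at a time and joins it once), instead of A's accumulation of candidate strings with strip/len checks and interleaved early returns; truncation becomes a single final slice to max(max_lines,1) lines.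
import Mathlib
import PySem

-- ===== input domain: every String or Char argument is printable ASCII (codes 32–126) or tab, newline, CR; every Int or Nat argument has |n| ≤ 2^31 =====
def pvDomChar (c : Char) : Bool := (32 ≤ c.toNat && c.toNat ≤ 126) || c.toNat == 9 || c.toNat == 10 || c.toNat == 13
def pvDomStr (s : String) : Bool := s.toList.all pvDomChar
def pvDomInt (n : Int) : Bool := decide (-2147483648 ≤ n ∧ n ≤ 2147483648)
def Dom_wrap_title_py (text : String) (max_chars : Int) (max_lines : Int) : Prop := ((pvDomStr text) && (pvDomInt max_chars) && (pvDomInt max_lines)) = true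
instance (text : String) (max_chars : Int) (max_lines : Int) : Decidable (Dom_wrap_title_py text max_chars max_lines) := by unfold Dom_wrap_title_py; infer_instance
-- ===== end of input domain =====

-- B decides line breaks by integer width arithmetic over the word list (a recursive splitter
-- that peels one greedy line at a time and joins it once), instead of A's candidate-string
-- accumulation with strip/len checks and early returns; objective: alternative.


-- ===== PORT A =====
-- inner `for word in words` loop; `.inl s` is the early `return "\n".join(lines)`,
-- `.inr (current, lines)` is falling off the word loop with this state
-- (`candidate` and the appended `lines` are inlined where Python names them)
def wrapA_words (max_chars max_lines : Int) (words : List String) (current : String)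
    (lines : List String) : Sum String (String × List String) :=
  match words with
  | [] => .inr (current, lines)
  | word :: ws =>
    if PySem.Str.len (PySem.Str.strip (current ++ " " ++ word)) ≤ max_chars ∨ current = "" then
      wrapA_words max_chars max_lines ws (PySem.Str.strip (current ++ " " ++ word)) lines
    else if max_lines ≤ ((lines ++ [current]).length : Int) then
      .inl (PySem.Str.join "\n" (lines ++ [current]))
    else
      wrapA_words max_chars max_lines ws word (lines ++ [current])

-- outer `for raw_line in raw_lines` loop (the `if not words: continue` is subsumed:
-- with words = [] the inner loop returns current = "" unchanged and nothing is appended)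
def wrapA_lines (max_chars max_lines : Int) (raw_lines : List String)
    (lines : List String) : String :=
  match raw_lines with
  | [] => PySem.Str.join "\n" (PySem.List.slice lines none (some max_lines))  -- lines[:max_lines]
  | raw :: rest =>
    match wrapA_words max_chars max_lines (PySem.Str.split₀ raw) "" lines with
    | .inl s => s
    | .inr (current, lines') =>
      if current ≠ "" then
        if max_lines ≤ ((lines' ++ [current]).length : Int) then
          PySem.Str.join "\n" (lines' ++ [current])
        else wrapA_lines max_chars max_lines rest (lines' ++ [current])
      else wrapA_lines max_chars max_lines rest lines'

-- `str(text or "")` is the identity on a str argument (the only falsy str is ""), ported as `text`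
def wrap_title_py (text : String) (max_chars : Int) (max_lines : Int) : String :=
  let raw_lines := ((PySem.Str.splitlines text).map PySem.Str.strip).filter (· ≠ "")
  let raw_lines := if raw_lines = [] then [PySem.Str.strip text] else raw_lines
  wrapA_lines max_chars max_lines raw_lines []

-- ===== PORT B =====
-- the `while rest and width + 1 + len(rest[0]) <= max_chars` loop of _wrap_greedy:
-- absorbs words into (line, width), returns the finished word group and the remaining words
def wrapB_take (max_chars : Int) (line : List String) (width : Int) (rest : List String) :
    List String × List String :=
  match rest with
  | [] => (line, [])
  | w :: ws =>
    if width + 1 + PySem.Str.len w ≤ max_chars then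
      wrapB_take max_chars (line ++ [w]) (width + 1 + PySem.Str.len w) ws
    else (line, w :: ws)

-- termination measure for wrapB_split: the loop only consumes words
lemma wrapB_take_snd_length_le (max_chars : Int) :
    ∀ (rest : List String) (line : List String) (width : Int),
      ((wrapB_take max_chars line width rest).2).length ≤ rest.length := by
  intro rest
  induction rest with
  | nil => intro line width; simp [wrapB_take]
  | cons w ws ih =>
    intro line width
    simp only [wrapB_take]
    split
    · exact Nat.le_succ_of_le (ih _ _)
    · simp

-- _wrap_greedy: peel one greedy line `[words[0]] ++ absorbed`, recurse on the rest
def wrapB_split (max_chars : Int) (words : List String) : List String :=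
  match words with
  | [] => []
  | w :: ws =>
    PySem.Str.join " " (wrapB_take max_chars [w] (PySem.Str.len w) ws).1 ::
      wrapB_split max_chars (wrapB_take max_chars [w] (PySem.Str.len w) ws).2
termination_by words.length
decreasing_by
  exact Nat.lt_succ_of_le (wrapB_take_snd_length_le max_chars ws [w] (PySem.Str.len w))

def wrap_title_py_alt (text : String) (max_chars : Int) (max_lines : Int) : String :=
  let raw_lines := ((PySem.Str.splitlines text).map PySem.Str.strip).filter (· ≠ "")
  let raw_lines := if raw_lines = [] then [PySem.Str.strip text] else raw_lines
  let full := raw_lines.foldl (fun full raw => full ++ wrapB_split max_chars (PySem.Str.split₀ raw)) []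
  PySem.Str.join "\n" (PySem.List.slice full none (some (max max_lines 1)))  -- full[:max(max_lines,1)]

-- ===== PRECONDITION & SPEC =====
def Spec_wrap_title_py (text : String) (max_chars : Int) (max_lines : Int) (out : String) : Prop := out = wrap_title_py_alt text max_chars max_lines
instance (text : String) (max_chars : Int) (max_lines : Int) (out : String) : Decidable (Spec_wrap_title_py text max_chars max_lines out) := by unfold Spec_wrap_title_py; infer_instance

-- ===== CLAIM (what is proved, stated in full; the proofs are below) =====
def Claim_equal_wrap_title_py : Prop := ∀ (text : String) (max_chars : Int) (max_lines : Int), Dom_wrap_title_py text max_chars max_lines → Spec_wrap_title_py text max_chars max_lines (wrap_title_py text max_chars max_lines)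

-- ===== LEMMAS AND PROOFS =====

-- proof-side normal form: the full greedy wrapping of one word list, recursively (A's shape)
def gw (max_chars : Int) (words : List String) (cur : String) : List String :=
  match words with
  | [] => if cur ≠ "" then [cur] else []
  | w :: ws =>
    if PySem.Str.len (PySem.Str.strip (cur ++ " " ++ w)) ≤ max_chars ∨ cur = "" then
      gw max_chars ws (PySem.Str.strip (cur ++ " " ++ w))
    else cur :: gw max_chars ws w

-- the number of wrapped lines both programs keep
def nKeep (max_lines : Int) : Nat := if 1 ≤ max_lines then max_lines.toNat else 1

-- a word as produced by str.split(): nonempty, no whitespace characters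
def goodW (w : List Char) : Prop := w ≠ [] ∧ ∀ c ∈ w, PySem.Chars.isspace c = false

def goodS (w : String) : Prop := goodW w.toList

-- a string safe under strip: nonempty, non-space first and last character
def okJ (j : List Char) : Prop :=
  j ≠ [] ∧ (∀ a ∈ j.head?, PySem.Chars.isspace a = false) ∧
    (∀ a ∈ j.getLast?, PySem.Chars.isspace a = false)

lemma strip_of_okJ (j : List Char) (h : okJ j) : PySem.Chars.strip j = j := by
  obtain ⟨hne, hh, hl⟩ := h
  obtain ⟨a, t, rfl⟩ := List.exists_cons_of_ne_nil hne
  have ha : PySem.Chars.isspace a = false := hh a (by simp)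
  unfold PySem.Chars.strip PySem.Chars.lstrip PySem.Chars.rstrip
  rw [List.dropWhile_cons, if_neg (by simp [ha])]
  obtain ⟨b, r, hr⟩ := List.exists_cons_of_ne_nil (l := (a :: t).reverse) (by simp)
  have hb : PySem.Chars.isspace b = false := by
    refine hl b ?_
    rw [← List.head?_reverse, hr]; simp
  rw [hr, List.dropWhile_cons, if_neg (by simp [hb]), ← hr, List.reverse_reverse]

lemma mem_of_mem_getLast? {α : Type} {l : List α} {a : α} (h : a ∈ l.getLast?) : a ∈ l := by
  rw [← List.head?_reverse] at h
  exact List.mem_reverse.mp (List.mem_of_mem_head? h)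

lemma okJ_word (w : List Char) (h : goodW w) : okJ w :=
  ⟨h.1, fun a ha => h.2 a (List.mem_of_mem_head? ha), fun a ha => h.2 a (mem_of_mem_getLast? ha)⟩

lemma okJ_join : ∀ (L : List (List Char)), L ≠ [] → (∀ w ∈ L, goodW w) →
    okJ (PySem.Chars.join [' '] L) := by
  intro L
  induction L with
  | nil => intro h; exact absurd rfl h
  | cons w L ih =>
    intro _ hg
    match L with
    | [] =>
      rw [PySem.Chars.join_singleton]
      exact okJ_word w (hg w (by simp))
    | q :: L' =>
      have hw : goodW w := hg w (by simp)
      have hJ : okJ (PySem.Chars.join [' '] (q :: L')) :=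
        ih (by simp) (fun x hx => hg x (by simp [hx]))
      rw [PySem.Chars.join_cons_cons]
      obtain ⟨a, t, hw'⟩ := List.exists_cons_of_ne_nil hw.1
      obtain ⟨b, hb⟩ := Option.isSome_iff_exists.mp (List.getLast?_isSome.mpr hJ.1)
      refine ⟨by simp [hw'], ?_, ?_⟩
      · intro x hx
        subst hw'
        simp only [List.cons_append, List.head?_cons, Option.mem_def, Option.some.injEq] at hx
        subst hx
        exact hw.2 a (by simp)
      · intro x hx
        rw [List.getLast?_append, hb] at hx
        simp only [Option.some_or, Option.mem_def, Option.some.injEq] at hx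
        subst hx
        exact hJ.2.2 b (by rw [hb]; rfl)

lemma join_append_singleton : ∀ (L : List (List Char)) (w : List Char), L ≠ [] →
    PySem.Chars.join [' '] (L ++ [w]) = PySem.Chars.join [' '] L ++ ' ' :: w := by
  intro L
  induction L with
  | nil => intro w h; exact absurd rfl h
  | cons x L ih =>
    intro w _
    match L with
    | [] =>
      simp only [List.cons_append, List.nil_append, PySem.Chars.join_cons_cons,
        PySem.Chars.join_singleton, List.append_assoc]
    | q :: L' =>
      have ih' := ih w (by simp)
      simp only [List.cons_append] at ih' ⊢
      rw [PySem.Chars.join_cons_cons (rest := L' ++ [w]),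
        PySem.Chars.join_cons_cons, ih']
      simp [List.append_assoc]

-- goodness of str.split() output
lemma split₀_go_good : ∀ (s cur : List Char) (accL : List (List Char)),
    (∀ c ∈ cur, PySem.Chars.isspace c = false) → (∀ x ∈ accL, goodW x) →
    ∀ x ∈ PySem.Chars.split₀.go s cur accL, goodW x := by
  intro s
  induction s with
  | nil =>
    intro cur accL hcur hacc x hx
    simp only [PySem.Chars.split₀.go] at hx
    by_cases hc : cur.isEmpty
    · rw [if_pos hc] at hx
      exact hacc x (List.mem_reverse.mp hx)
    · rw [if_neg hc] at hx
      rcases List.mem_cons.mp (List.mem_reverse.mp hx) with h1 | h1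
      · subst h1
        refine ⟨by simpa [List.isEmpty_iff] using hc, ?_⟩
        intro c hcm
        exact hcur c (List.mem_reverse.mp hcm)
      · exact hacc x h1
  | cons c rest ih =>
    intro cur accL hcur hacc x hx
    simp only [PySem.Chars.split₀.go] at hx
    by_cases hsp : PySem.Chars.isspace c
    · rw [if_pos hsp] at hx
      by_cases hc : cur.isEmpty
      · rw [if_pos hc] at hx
        exact ih [] accL (by simp) hacc x hx
      · rw [if_neg hc] at hx
        refine ih [] (cur.reverse :: accL) (by simp) ?_ x hx
        intro y hy
        rcases List.mem_cons.mp hy with h1 | h1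
        · subst h1
          refine ⟨by simpa [List.isEmpty_iff] using hc, ?_⟩
          intro d hd
          exact hcur d (List.mem_reverse.mp hd)
        · exact hacc y h1
    · rw [if_neg hsp] at hx
      refine ih (c :: cur) accL ?_ hacc x hx
      intro d hd
      rcases List.mem_cons.mp hd with h1 | h1
      · subst h1; simpa using hsp
      · exact hcur d h1

lemma split₀_goodS (s : String) : ∀ w ∈ PySem.Str.split₀ s, goodS w := by
  intro w hw
  have hm : w.toList ∈ PySem.Chars.split₀ s.toList := by
    rw [← PySem.Str.split₀_map_toList]
    exact List.mem_map_of_mem hw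
  exact split₀_go_good s.toList [] [] (by simp) (by simp) w.toList hm

-- string-level bridge facts (cur = " ".join(line) for a nonempty list of good words)
lemma sj_toList (line : List String) :
    (PySem.Str.join " " line).toList = PySem.Chars.join [' '] (line.map String.toList) := by
  rw [PySem.Str.toList_join]; rfl

lemma goodW_map (line : List String) (h : ∀ w ∈ line, goodS w) :
    ∀ x ∈ line.map String.toList, goodW x := by
  intro x hx
  obtain ⟨w, hw, rfl⟩ := List.mem_map.mp hx
  exact h w hw

lemma sj_ne_empty (line : List String) (h : line ≠ []) (hg : ∀ w ∈ line, goodS w) :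
    PySem.Str.join " " line ≠ "" := by
  intro he
  have := (okJ_join (line.map String.toList) (by simpa using h) (goodW_map line hg)).1
  rw [← sj_toList line, he] at this
  exact this rfl

lemma strip_sj_word (line : List String) (w : String) (h : line ≠ [])
    (hg : ∀ x ∈ line, goodS x) (hw : goodS w) :
    PySem.Str.strip (PySem.Str.join " " line ++ " " ++ w) = PySem.Str.join " " (line ++ [w]) := by
  apply String.toList_inj.mp
  rw [PySem.Str.toList_strip, String.toList_append, String.toList_append,
    sj_toList line, sj_toList (line ++ [w]),
    List.map_append, List.map_singleton,
    join_append_singleton _ _ (by simpa using h)]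
  have hok : okJ (PySem.Chars.join [' '] (line.map String.toList) ++ ' ' :: w.toList) := by
    rw [← join_append_singleton _ _ (by simpa using h), ← List.map_singleton (f := String.toList),
      ← List.map_append]
    exact okJ_join _ (by simp) (goodW_map _ (by
      intro x hx
      rcases List.mem_append.mp hx with h1 | h1
      · exact hg x h1
      · simp only [List.mem_singleton] at h1; subst h1; exact hw))
  have : (" " : String).toList ++ w.toList = ' ' :: w.toList := rfl
  rw [List.append_assoc, this]
  exact strip_of_okJ _ hok

lemma len_sj_append (line : List String) (w : String) (h : line ≠ []) :
    PySem.Str.len (PySem.Str.join " " (line ++ [w])) =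
      PySem.Str.len (PySem.Str.join " " line) + 1 + PySem.Str.len w := by
  rw [PySem.Str.len_eq, PySem.Str.len_eq, PySem.Str.len_eq,
    sj_toList (line ++ [w]), sj_toList line,
    List.map_append, List.map_singleton, join_append_singleton _ _ (by simpa using h)]
  simp only [List.length_append, List.length_cons]
  push_cast
  ring

lemma sj_singleton (w : String) : PySem.Str.join " " [w] = w := by
  apply String.toList_inj.mp
  rw [sj_toList [w], List.map_singleton, PySem.Chars.join_singleton]

lemma strip_space_word (w : String) (hw : goodS w) :
    PySem.Str.strip ("" ++ " " ++ w) = w := by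
  apply String.toList_inj.mp
  rw [PySem.Str.toList_strip, String.toList_append, String.toList_append]
  have h1 : ("" : String).toList ++ (" " : String).toList ++ w.toList = ' ' :: w.toList := rfl
  rw [h1]
  have h2 : PySem.Chars.strip (' ' :: w.toList) = PySem.Chars.strip w.toList := by
    unfold PySem.Chars.strip PySem.Chars.lstrip
    rw [List.dropWhile_cons, if_pos (by decide)]
  rw [h2, strip_of_okJ _ (okJ_word _ hw)]

-- the crux: gw from a running line equals B's take-then-recurse splitter
lemma gw_eq_take (mc : Int) : ∀ (ws line : List String) (width : Int),
    (∀ w ∈ ws, goodS w) → line ≠ [] → (∀ w ∈ line, goodS w) →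
    width = PySem.Str.len (PySem.Str.join " " line) →
    gw mc ws (PySem.Str.join " " line) =
      PySem.Str.join " " (wrapB_take mc line width ws).1 ::
        wrapB_split mc (wrapB_take mc line width ws).2 := by
  intro ws
  induction ws with
  | nil =>
    intro line width _ hne hg _
    simp only [wrapB_take, gw, wrapB_split]
    rw [if_pos (sj_ne_empty line hne hg)]
  | cons w ws ih =>
    intro line width hws hne hg hwidth
    have hw : goodS w := hws w (by simp)
    have hws' : ∀ x ∈ ws, goodS x := fun x hx => hws x (by simp [hx])
    have hstrip := strip_sj_word line w hne hg hw
    have hlen := len_sj_append line w hne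
    by_cases hc : width + 1 + PySem.Str.len w ≤ mc
    · have hcond : PySem.Str.len (PySem.Str.strip (PySem.Str.join " " line ++ " " ++ w)) ≤ mc ∨
          PySem.Str.join " " line = "" := by
        left; rw [hstrip, hlen, ← hwidth]; exact hc
      simp only [gw, wrapB_take]
      rw [if_pos hcond, if_pos hc, hstrip]
      exact ih (line ++ [w]) (width + 1 + PySem.Str.len w) hws' (by simp)
        (by intro x hx
            rcases List.mem_append.mp hx with h1 | h1
            · exact hg x h1
            · simp only [List.mem_singleton] at h1; subst h1; exact hw)
        (by rw [hlen, hwidth])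
    · have hcond : ¬ (PySem.Str.len (PySem.Str.strip (PySem.Str.join " " line ++ " " ++ w)) ≤ mc ∨
          PySem.Str.join " " line = "") := by
        rintro (h1 | h1)
        · rw [hstrip, hlen, ← hwidth] at h1; exact hc h1
        · exact sj_ne_empty line hne hg h1
      simp only [gw, wrapB_take]
      rw [if_neg hcond, if_neg hc]
      congr 1
      have := ih [w] (PySem.Str.len w) hws' (by simp) (by simpa using hw)
        (by rw [sj_singleton])
      rw [sj_singleton] at this
      rw [this]
      simp only [wrapB_split]

lemma wrapB_split_eq_gw (mc : Int) (ws : List String) (hws : ∀ w ∈ ws, goodS w) :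
    wrapB_split mc ws = gw mc ws "" := by
  match ws with
  | [] => simp [wrapB_split, gw]
  | w :: ws' =>
    have hw : goodS w := hws w (by simp)
    have hws' : ∀ x ∈ ws', goodS x := fun x hx => hws x (by simp [hx])
    have hstep : gw mc (w :: ws') "" = gw mc ws' w := by
      simp only [gw]
      rw [if_pos (Or.inr trivial), strip_space_word w hw]
    rw [hstep]
    have := gw_eq_take mc ws' [w] (PySem.Str.len w) hws' (by simp) (by simpa using hw)
      (by rw [sj_singleton])
    rw [sj_singleton] at this
    rw [this]
    simp only [wrapB_split]

-- ===== A-side reduction (invariant on A's `lines` accumulator) =====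
def inv (max_lines : Int) (lines : List String) : Prop :=
  (lines.length : Int) < max_lines ∨ lines = []

lemma word_loop_lemma (mc ml : Int) : ∀ (ws : List String) (cur : String) (lines : List String),
    inv ml lines →
    (∃ ls, wrapA_words mc ml ws cur lines = .inl (PySem.Str.join "\n" ls) ∧
        ls = (lines ++ gw mc ws cur).take (nKeep ml) ∧ nKeep ml ≤ (lines ++ gw mc ws cur).length)
    ∨ (∃ c ls, wrapA_words mc ml ws cur lines = .inr (c, ls) ∧
        ls ++ (if c ≠ "" then [c] else []) = lines ++ gw mc ws cur ∧ inv ml ls) := by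
  intro ws
  induction ws with
  | nil =>
    intro cur lines hinv
    exact Or.inr ⟨cur, lines, rfl, rfl, hinv⟩
  | cons w ws ih =>
    intro cur lines hinv
    by_cases h : PySem.Str.len (PySem.Str.strip (cur ++ " " ++ w)) ≤ mc ∨ cur = ""
    · have hg : gw mc (w :: ws) cur = gw mc ws (PySem.Str.strip (cur ++ " " ++ w)) := by
        simp only [gw]; rw [if_pos h]
      have hw : wrapA_words mc ml (w :: ws) cur lines =
          wrapA_words mc ml ws (PySem.Str.strip (cur ++ " " ++ w)) lines := by
        simp only [wrapA_words]; rw [if_pos h]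
      rw [hw, hg]
      exact ih _ lines hinv
    · have hg : gw mc (w :: ws) cur = cur :: gw mc ws w := by
        simp only [gw]; rw [if_neg h]
      by_cases hret : ml ≤ ((lines ++ [cur]).length : Int)
      · have hw : wrapA_words mc ml (w :: ws) cur lines =
            .inl (PySem.Str.join "\n" (lines ++ [cur])) := by
          simp only [wrapA_words]; rw [if_neg h, if_pos hret]
        have hret' : ml ≤ (lines.length : Int) + 1 := by simpa using hret
        have hl0 : (lines.length : Int) < ml ∨ lines.length = 0 := by
          rcases hinv with h1 | h1
          · exact Or.inl h1
          · subst h1; exact Or.inr rfl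
        have hn : nKeep ml = lines.length + 1 := by
          unfold nKeep
          by_cases hml : (1:Int) ≤ ml
          · rw [if_pos hml]; omega
          · rw [if_neg hml]; omega
        refine Or.inl ⟨lines ++ [cur], hw, ?_, ?_⟩
        · rw [hg, hn]
          simp [List.take_append]
        · rw [hg, hn]
          simp only [List.length_append, List.length_cons]
          omega
      · have hw : wrapA_words mc ml (w :: ws) cur lines =
            wrapA_words mc ml ws w (lines ++ [cur]) := by
          simp only [wrapA_words]; rw [if_neg h, if_neg hret]
        have hinv' : inv ml (lines ++ [cur]) := Or.inl (by
          simp only [List.length_append, List.length_cons, List.length_nil] at hret ⊢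
          omega)
        have hsh : lines ++ gw mc (w :: ws) cur = (lines ++ [cur]) ++ gw mc ws w := by
          rw [hg, List.append_assoc, List.singleton_append]
        rw [hw, hsh]
        exact ih w (lines ++ [cur]) hinv'

lemma line_loop_lemma (mc ml : Int) : ∀ (raws : List String) (lines : List String),
    inv ml lines →
    wrapA_lines mc ml raws lines =
      PySem.Str.join "\n"
        ((lines ++ raws.flatMap (fun r => gw mc (PySem.Str.split₀ r) "")).take (nKeep ml)) := by
  intro raws
  induction raws with
  | nil =>
    intro lines hinv
    simp only [wrapA_lines, List.flatMap_nil, List.append_nil]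
    congr 1
    rcases hinv with h1 | h1
    · rw [PySem.List.slice_to _ (by omega : (0:Int) ≤ ml)]
      have : nKeep ml = ml.toNat := by unfold nKeep; rw [if_pos (by omega : (1:Int) ≤ ml)]
      rw [this]
    · subst h1
      rw [List.take_nil]
      simp [PySem.List.slice]
  | cons raw rest ih =>
    intro lines hinv
    rcases word_loop_lemma mc ml (PySem.Str.split₀ raw) "" lines hinv with
      ⟨ls, heq, hls, hlen⟩ | ⟨c, ls, heq, hls, hinv'⟩
    · simp only [wrapA_lines, heq, List.flatMap_cons, ← List.append_assoc]
      rw [List.take_append_of_le_length hlen, ← hls]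
    · simp only [wrapA_lines, heq, List.flatMap_cons, ← List.append_assoc]
      by_cases hc : c ≠ ""
      · rw [if_pos hc]
        rw [if_pos hc] at hls
        by_cases hret : ml ≤ ((ls ++ [c]).length : Int)
        · rw [if_pos hret]
          have hret' : ml ≤ (ls.length : Int) + 1 := by simpa using hret
          have hl0 : (ls.length : Int) < ml ∨ ls.length = 0 := by
            rcases hinv' with h1 | h1
            · exact Or.inl h1
            · subst h1; exact Or.inr rfl
          have hn : nKeep ml = ls.length + 1 := by
            unfold nKeep
            by_cases hml : (1:Int) ≤ ml
            · rw [if_pos hml]; omega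
            · rw [if_neg hml]; omega
          rw [← hls, List.append_assoc, hn]
          congr 1
          simp [List.take_append]
        · rw [if_neg hret]
          have hinv'' : inv ml (ls ++ [c]) := Or.inl (by
            simp only [List.length_append, List.length_cons, List.length_nil] at hret ⊢
            omega)
          rw [ih (ls ++ [c]) hinv'', ← hls, List.append_assoc]
      · rw [if_neg hc]
        rw [if_neg hc, List.append_nil] at hls
        rw [ih ls hinv', ← hls]

-- B's foldl-extend loop is the flatMap of the per-line splitter, rewritten to gw
lemma foldl_extend_eq (mc : Int) (R : List String) :
    R.foldl (fun full raw => full ++ wrapB_split mc (PySem.Str.split₀ raw)) [] =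
      R.flatMap (fun r => gw mc (PySem.Str.split₀ r) "") := by
  rw [PySem.List.foldl_append_eq_flatMap, List.nil_append]
  exact List.flatMap_congr (fun r _ => wrapB_split_eq_gw mc (PySem.Str.split₀ r) (split₀_goodS r))

-- nKeep is B's slice bound
lemma nKeep_eq_max (ml : Int) : nKeep ml = (max ml 1).toNat := by
  unfold nKeep
  by_cases h : (1:Int) ≤ ml
  · rw [if_pos h]; omega
  · rw [if_neg h]; omega

-- the whole programs, after the (shared) raw_lines computation
lemma top_lemma (mc ml : Int) (R : List String) :
    wrapA_lines mc ml R [] =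
      PySem.Str.join "\n"
        (PySem.List.slice (R.foldl (fun full raw => full ++ wrapB_split mc (PySem.Str.split₀ raw)) [])
          none (some (max ml 1))) := by
  rw [foldl_extend_eq, line_loop_lemma mc ml R [] (Or.inr rfl),
    PySem.List.slice_to _ (by omega : (0:Int) ≤ max ml 1), List.nil_append, nKeep_eq_max]

-- ===== VERDICT (by name: the statement is the Claim_ definition above) =====
theorem wrap_title_py_spec : Claim_equal_wrap_title_py := by
  intro text mc ml _
  unfold Spec_wrap_title_py wrap_title_py wrap_title_py_alt
  exact top_lemma mc ml _
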